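-- pv_equiv track=rewrite | github.com/ChenyuHeee/PDF2MD | pdf2md/writers/markdown.py | _tighten_lists
-- ===== SOURCE A (Python) =====
-- def _tighten_lists(md: str) -> str:
--     """把连续的列表项之间的空行去掉，让 GFM 认为是同一个列表。"""
--
--     out_lines = []
--     lines = md.split("\n")
--     for i, line in enumerate(lines):
--         if (
--             line == ""
--             and i > 0
--             and i + 1 < len(lines)
--             and _is_list_line(lines[i - 1])
--             and _is_list_line(lines[i + 1])
--         ):
--             continue
--         out_lines.append(line)
--     return "\n".join(out_lines)
--
-- def _is_list_line(s: str) -> bool: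
--     s = s.lstrip()
--     if s.startswith("- "):
--         return True
--     if len(s) > 2 and s[0].isdigit() and s[1:3] in (". ", ") "):
--         return True
--     return False
-- ===== SOURCE B (Python) =====
-- def _tighten_lists(md: str) -> str:
--     """One-pass streaming rewrite: hold each blank that follows a list line and
--     drop it only if the next line is also a list line (no index lookups)."""
--     out_lines = []
--     prev = None
--     pending = False  # a blank line following a list line is being held back
--     for line in md.split("\n"):
--         if pending:
--             if not _is_list_line(line):
--                 out_lines.append("")
--             pending = False
--         if line == "" and prev is not None and _is_list_line(prev):
--             pending = True
--         else:
--             out_lines.append(line)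
--         prev = line
--     if pending:
--         out_lines.append("")
--     return "\n".join(out_lines)
--
--
-- def _is_list_line(s: str) -> bool:
--     s = s.lstrip()
--     if s.startswith("- "):
--         return True
--     if len(s) > 2 and s[0].isdigit() and s[1:3] in (". ", ") "):
--         return True
--     return False
-- ===== Notes on version B (the rewrite author's own statement) =====
-- stated objective: alternative
-- what changed: Replaces A's index-based loop that re-reads lines[i-1] and lines[i+1] for every blank line with a one-pass streaming state machine that holds back a blank line following a list item and drops or emits it once the next line is seen.
import Mathlib
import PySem

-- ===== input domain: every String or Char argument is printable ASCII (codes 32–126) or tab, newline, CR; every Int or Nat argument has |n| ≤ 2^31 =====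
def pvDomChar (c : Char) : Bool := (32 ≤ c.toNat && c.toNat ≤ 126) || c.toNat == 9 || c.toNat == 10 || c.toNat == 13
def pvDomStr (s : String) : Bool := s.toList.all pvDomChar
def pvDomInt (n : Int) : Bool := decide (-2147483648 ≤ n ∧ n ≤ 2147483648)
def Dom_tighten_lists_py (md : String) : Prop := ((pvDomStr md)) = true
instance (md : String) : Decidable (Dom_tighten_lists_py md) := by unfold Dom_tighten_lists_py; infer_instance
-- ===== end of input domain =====

-- B replaces A's index-based loop (lines[i-1]/lines[i+1] lookups) by a one-pass
-- streaming state machine that holds back a blank line until the next line is seen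
-- (objective: alternative decomposition, same O(n) cost).

-- shared helper: Python's _is_list_line, identical in Source A and Source B
def isListLine (s : String) : Bool :=
  let t := PySem.Str.lstrip s
  if PySem.Str.startswith t "- " then true
  else if decide (2 < PySem.Str.len t)
        && (match PySem.Str.pyGet? t 0 with | some c => PySem.Chars.isdigit c | none => false)
        && (PySem.Str.slice t (some 1) (some 3) == ". " || PySem.Str.slice t (some 1) (some 3) == ") ")
  then true else false

-- md.split("\n"): the separator is the nonempty literal "\n", so split? is always some
def pySplitNl (md : String) : List String :=
  (PySem.Str.split? md "\n").getD []

-- ===== PORT A =====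
-- A's loop body; lines[i-1] / lines[i+1] are guarded in range by the i > 0 /
-- i + 1 < len(lines) conjuncts, so pyGetD's default "" is unreachable
def aStep (lines : List String) (out : List String) (p : Int × String) : List String :=
  if p.2 == ""
      && decide (0 < p.1)
      && decide (p.1 + 1 < (lines.length : Int))
      && isListLine (PySem.List.pyGetD lines (p.1 - 1) "")
      && isListLine (PySem.List.pyGetD lines (p.1 + 1) "")
  then out
  else out ++ [p.2]

def tighten_lists_py (md : String) : String :=
  let lines := pySplitNl md
  let out_lines := (PySem.List.enumerate lines).foldl (aStep lines) []
  PySem.Str.join "\n" out_lines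

-- ===== PORT B =====
-- B's loop body: state = (out_lines, prev, pending)
def bStep (st : List String × Option String × Bool) (line : String) :
    List String × Option String × Bool :=
  let out₁ := if st.2.2 then (if !isListLine line then st.1 ++ [""] else st.1) else st.1
  if line == "" && (match st.2.1 with | some p => isListLine p | none => false)
  then (out₁, some line, true)
  else (out₁ ++ [line], some line, false)

def tighten_lists_py_alt (md : String) : String :=
  let res := (pySplitNl md).foldl bStep ([], none, false)
  PySem.Str.join "\n" (if res.2.2 then res.1 ++ [""] else res.1)

-- ===== PRECONDITION & SPEC =====
def Spec_tighten_lists_py (md : String) (out : String) : Prop := out = tighten_lists_py_alt md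
instance (md : String) (out : String) : Decidable (Spec_tighten_lists_py md out) := by unfold Spec_tighten_lists_py; infer_instance

-- ===== CLAIM (what is proved, stated in full; the proofs are below) =====
def Claim_equal_tighten_lists_py : Prop := ∀ (md : String), Dom_tighten_lists_py md → Spec_tighten_lists_py md (tighten_lists_py md)

-- ===== LEMMAS AND PROOFS =====

def optList : Option String → Bool
  | none => false
  | some s => isListLine s
def filt : Option String → List String → List String
  | _, [] => []
  | p, x :: r =>
    if x == "" && optList p && optList r.head? then filt (some x) r
    else x :: filt (some x) r
@[simp] lemma optList_none : optList none = false := rfl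
@[simp] lemma optList_some (s : String) : optList (some s) = isListLine s := rfl
lemma isListLine_empty : isListLine "" = false := by decide
def emit : Option String → Bool → List String → List String
  | _, pending, [] => if pending then [""] else []
  | p, pending, x :: r =>
    (if pending && !isListLine x then [""] else []) ++
    (if x == "" && optList p then emit (some x) true r
     else x :: emit (some x) false r)
lemma emit_filt :
    ∀ (suf : List String),
    (∀ p, emit p false suf = filt p suf) ∧
    (emit (some "") true suf = (if optList suf.head? then [] else [""]) ++ filt (some "") suf) := by
  intro suf
  induction suf with
  | nil => simp [emit, filt]
  | cons x r ih =>
    refine ⟨fun p => ?_, ?_⟩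
    · by_cases hx : x = "" <;> by_cases hp : optList p = true <;>
        simp [emit, filt, hx, hp, ih.1, ih.2, isListLine_empty]
      by_cases hh : optList r.head? = true <;> simp [hh]
    · by_cases hl : isListLine x = true <;>
        simp [emit, filt, isListLine_empty, ih.1, hl]
lemma bLoop :
    ∀ (suf : List String) (out : List String) (prev : Option String) (pending : Bool),
    (let res := suf.foldl bStep (out, prev, pending);
     if res.2.2 then res.1 ++ [""] else res.1) = out ++ emit prev pending suf := by
  intro suf
  induction suf with
  | nil => intro out prev pending; cases pending <;> simp [emit]
  | cons x r ih =>
    intro out prev pending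
    simp only [List.foldl_cons]
    have hcond : (x == "" && (match prev with | some p => isListLine p | none => false)) = (x == "" && optList prev) := by
      cases prev <;> rfl
    by_cases hc : (x == "" && optList prev) = true <;>
      by_cases hp : pending = true <;> by_cases hl : isListLine x = true <;>
        rw [show bStep (out, prev, pending) x
              = ((if pending then (if !isListLine x then out ++ [""] else out) else out) ++
                  (if x == "" && optList prev then [] else [x]), some x,
                 (x == "" && optList prev)) from by
            simp only [bStep, hcond]; by_cases h2 : (x == "" && optList prev) = true <;> simp [h2]] <;>
        rw [ih] <;>
        simp [emit, hc, hp, hl, List.append_assoc]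
lemma aStep_eq (lines : List String) (i : Nat) (x : String) (r : List String)
    (h : lines.drop i = x :: r) (acc : List String) :
    aStep lines acc ((i : Int), x)
      = acc ++ (if x == "" && optList (if i = 0 then none else lines[i-1]?) && optList r.head? then [] else [x]) := by
  have hx : lines[i]? = some x := by rw [← List.head?_drop, h]; rfl
  have hi : i < lines.length := (List.getElem?_eq_some_iff.1 hx).1
  have hhead : r.head? = lines[i+1]? := by
    rw [← List.head?_drop, ← List.tail_drop, h]; rfl
  cases i with
  | zero =>
    simp [aStep]
  | succ j =>
    have hj : j < lines.length := by omega
    have hq : lines[j]? = some lines[j] := List.getElem?_eq_getElem hj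
    by_cases hlen : j + 1 + 1 < lines.length
    · have hc : ((j:Int) + 1 + 1) < (lines.length : Int) := by exact_mod_cast hlen
      have hg2' : PySem.List.pyGetD lines ((j:Int) + 1 + 1) "" = lines[j+1+1] := by
        have e : ((j:Int) + 1 + 1) = (((j+2 : Nat)) : Int) := by push_cast; ring
        rw [e, PySem.List.pyGetD_natCast, List.getD_eq_getElem?_getD,
            List.getElem?_eq_getElem (by omega : j+2 < lines.length)]
        rfl
      have hh : r.head? = some lines[j+1+1] := by
        rw [hhead]; exact List.getElem?_eq_getElem hlen
      simp [aStep, hg2', hh, hq, hc]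
      split_ifs <;> simp
    · have hc : ¬ (((j:Int) + 1 + 1) < (lines.length : Int)) := by omega
      have hh : r.head? = none := by
        rw [hhead]; simp; omega
      simp [aStep, hh, hq, hc]

lemma aLoop (lines : List String) :
    ∀ (suf : List String) (i : Nat) (acc : List String), lines.drop i = suf →
    (PySem.List.enumerate suf (i : Int)).foldl (aStep lines) acc
      = acc ++ filt (if i = 0 then none else lines[i-1]?) suf := by
  intro suf
  induction suf with
  | nil => intro i acc h; simp [PySem.List.enumerate_nil, filt]
  | cons x r ih =>
    intro i acc h
    have hx : lines[i]? = some x := by rw [← List.head?_drop, h]; rfl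
    have hr : lines.drop (i+1) = r := by rw [← List.tail_drop, h]; rfl
    rw [PySem.List.enumerate_cons, List.foldl_cons, aStep_eq lines i x r h acc]
    have : ((i : Int) + 1) = (((i+1 : Nat)) : Int) := by push_cast; ring
    rw [this, ih (i+1) _ hr]
    have hp1 : (if i + 1 = 0 then none else lines[i+1-1]?) = some x := by simpa using hx
    rw [hp1]
    by_cases hc : (x == "" && optList (if i = 0 then none else lines[i-1]?) && optList r.head?) = true <;>
      simp [filt, hc, List.append_assoc]

-- ===== VERDICT (by name: the statement is the Claim_ definition above) =====
theorem tighten_lists_py_spec : Claim_equal_tighten_lists_py := by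
  intro md _
  show tighten_lists_py md = tighten_lists_py_alt md
  unfold tighten_lists_py tighten_lists_py_alt
  have hA := aLoop (pySplitNl md) (pySplitNl md) 0 [] (by simp)
  have hB := bLoop (pySplitNl md) [] none false
  simp only [Nat.cast_zero] at hA
  simp only [] at hA hB ⊢
  rw [hA, hB, (emit_filt (pySplitNl md)).1 none]
  simp
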